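-- pv_equiv track=rewrite | github.com/Koddulfsen/vibe-ai | idea_to_solution_engine.py | _enhance_idea_from_thinking
-- ===== SOURCE A (Python) =====
-- from typing import Dict, List, Optional, Any, Tuple
--
-- def _enhance_idea_from_thinking(idea: str, thinking_steps: List[Dict]) -> str:
--     """Enhance idea based on thinking steps"""
--     enhancements = []
--
--     # Extract key insights from thinking
--     for step in thinking_steps:
--         if "problem" in step["thought"].lower():
--             enhancements.append("solving a clear problem")
--         elif "audience" in step["thought"].lower():
--             enhancements.append("targeting specific users")
--         elif "features" in step["thought"].lower():
--             enhancements.append("with well-defined features")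
--         elif "technical" in step["thought"].lower():
--             enhancements.append("addressing technical challenges")
--         elif "unique" in step["thought"].lower():
--             enhancements.append("offering unique value")
--
--     # Create enhanced description
--     enhanced = f"{idea}"
--     if enhancements:
--         enhanced += f" - {', '.join(enhancements)}"
--
--     return enhanced
-- ===== SOURCE B (Python) =====
-- from typing import Dict, List
--
-- _KEYWORDS = ["problem", "audience", "features", "technical", "unique"]
-- _PHRASES = ["solving a clear problem", "targeting specific users",
--             "with well-defined features", "addressing technical challenges",
--             "offering unique value"]
--
-- def _phrase_of(thought):
--     """Phrase of the highest-priority (lowest-index) keyword occurring in the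
--     lowercased thought, or None.  Checks all keywords and takes the minimum
--     index, which equals A's first-match priority since the order is the same."""
--     t = thought.lower()
--     hits = [i for i, kw in enumerate(_KEYWORDS) if kw in t]
--     return _PHRASES[min(hits)] if hits else None
--
-- def _suffix(steps):
--     """Comma-joined phrase string for the steps, built back-to-front by
--     recursion; None when no step contributes a phrase."""
--     if not steps:
--         return None
--     p = _phrase_of(steps[0]["thought"])
--     rest = _suffix(steps[1:])
--     if p is None:
--         return rest
--     return p if rest is None else p + ", " + rest
--
-- def _enhance_idea_from_thinking(idea: str, thinking_steps: List[Dict]) -> str: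
--     s = _suffix(thinking_steps)
--     return idea if s is None else idea + " - " + s
-- ===== Notes on version B (the rewrite author's own statement) =====
-- stated objective: alternative
-- what changed: Replaces A's append-to-list loop with an if/elif chain by a recursion over the steps that builds the comma-joined suffix string directly back-to-front (no phrase list, no join), classifying each step by the minimum index among all matching keywords instead of breaking at the first match.
import Mathlib
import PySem

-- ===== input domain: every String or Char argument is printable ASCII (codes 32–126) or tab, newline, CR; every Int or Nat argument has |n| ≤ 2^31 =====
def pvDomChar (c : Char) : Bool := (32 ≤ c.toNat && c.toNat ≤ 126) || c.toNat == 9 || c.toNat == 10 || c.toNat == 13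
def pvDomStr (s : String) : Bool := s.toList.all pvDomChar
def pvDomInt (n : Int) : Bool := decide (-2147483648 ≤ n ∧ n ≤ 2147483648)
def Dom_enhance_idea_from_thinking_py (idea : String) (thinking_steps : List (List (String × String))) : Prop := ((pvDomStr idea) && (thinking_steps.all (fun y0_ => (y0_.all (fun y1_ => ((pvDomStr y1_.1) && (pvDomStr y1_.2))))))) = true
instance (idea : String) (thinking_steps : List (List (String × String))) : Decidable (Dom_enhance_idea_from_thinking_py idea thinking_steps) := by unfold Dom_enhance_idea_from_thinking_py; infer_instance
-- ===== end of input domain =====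

-- B recurses over the steps building the comma-joined suffix string directly (no phrase list,
-- no join), classifying each step by the minimum matching-keyword index instead of a
-- break-on-first chain (objective: alternative); return values agree on Pre_.

-- ===== PORT A =====
-- A's per-step if/elif chain appending to the accumulating enhancements list
-- (step["thought"].lower() is pure, so lowering once per step is the same value).
def pvStepEnh (step : List (String × String)) (acc : List String) : List String :=
  let t := PySem.Str.lower (PySem.Dict.getD (PySem.Dict.ofList step) "thought" "")
  if PySem.Str.isIn "problem" t then acc ++ ["solving a clear problem"]
  else if PySem.Str.isIn "audience" t then acc ++ ["targeting specific users"]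
  else if PySem.Str.isIn "features" t then acc ++ ["with well-defined features"]
  else if PySem.Str.isIn "technical" t then acc ++ ["addressing technical challenges"]
  else if PySem.Str.isIn "unique" t then acc ++ ["offering unique value"]
  else acc

def enhance_idea_from_thinking_py (idea : String) (thinking_steps : List (List (String × String))) : String :=
  let enhancements := thinking_steps.foldl (fun acc step => pvStepEnh step acc) []
  let enhanced := idea
  if enhancements ≠ [] then enhanced ++ " - " ++ PySem.Str.join ", " enhancements
  else enhanced

-- ===== PORT B =====
def pvKeywords : List String :=
  ["problem", "audience", "features", "technical", "unique"]
def pvPhrases : List String :=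
  ["solving a clear problem", "targeting specific users", "with well-defined features",
   "addressing technical challenges", "offering unique value"]

-- _phrase_of: min index among ALL matching keywords, mapped into _PHRASES
def pvPhraseOf (thought : String) : Option String :=
  let t := PySem.Str.lower thought
  let hits := ((PySem.List.enumerate pvKeywords 0).filter
                 (fun ik => PySem.Str.isIn ik.2 t)).map (fun ik => ik.1)
  if hits ≠ [] then
    match PySem.List.min? hits (fun x => x) with
    | some m => PySem.List.pyGet? pvPhrases m   -- index always valid here, so this is the phrase
    | none => none
  else none

-- _suffix: recursion on steps[0] / steps[1:], building the ", "-joined string back-to-front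
def pvSuffix : List (List (String × String)) → Option String
  | [] => none
  | s :: rest =>
    let p := pvPhraseOf (PySem.Dict.getD (PySem.Dict.ofList s) "thought" "")
    let r := pvSuffix rest
    match p with
    | none => r
    | some ph =>
      match r with
      | none => some ph
      | some rs => some (ph ++ ", " ++ rs)

def enhance_idea_from_thinking_py_alt (idea : String) (thinking_steps : List (List (String × String))) : String :=
  match pvSuffix thinking_steps with
  | none => idea
  | some s => idea ++ " - " ++ s

-- ===== PRECONDITION & SPEC =====
-- Pre_ excludes steps lacking the key "thought", on which A raises KeyError.
def Pre_enhance_idea_from_thinking_py (idea : String) (thinking_steps : List (List (String × String))) : Prop :=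
  ∀ step ∈ thinking_steps, (PySem.Dict.ofList step).contains "thought" = true
instance (idea : String) (thinking_steps : List (List (String × String))) : Decidable (Pre_enhance_idea_from_thinking_py idea thinking_steps) := by unfold Pre_enhance_idea_from_thinking_py; infer_instance

def pvWitness_enhance_idea_from_thinking_py : String × (List (List (String × String))) :=
  ("my app", [[("thought", "What Problem does it solve?")], [("thought", "nothing here")]])

def Spec_enhance_idea_from_thinking_py (idea : String) (thinking_steps : List (List (String × String))) (out : String) : Prop := out = enhance_idea_from_thinking_py_alt idea thinking_steps
instance (idea : String) (thinking_steps : List (List (String × String))) (out : String) : Decidable (Spec_enhance_idea_from_thinking_py idea thinking_steps out) := by unfold Spec_enhance_idea_from_thinking_py; infer_instance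

-- ===== CLAIM (what is proved, stated in full; the proofs are below) =====
def Claim_equal_enhance_idea_from_thinking_py : Prop := ∀ (idea : String) (thinking_steps : List (List (String × String))), Dom_enhance_idea_from_thinking_py idea thinking_steps → Pre_enhance_idea_from_thinking_py idea thinking_steps → Spec_enhance_idea_from_thinking_py idea thinking_steps (enhance_idea_from_thinking_py idea thinking_steps)

-- ===== LEMMAS AND PROOFS =====

-- A's chain, as an Option (proof-side description of A's per-step behaviour)
def pvChainOpt (t : String) : Option String :=
  if PySem.Str.isIn "problem" t then some "solving a clear problem"
  else if PySem.Str.isIn "audience" t then some "targeting specific users"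
  else if PySem.Str.isIn "features" t then some "with well-defined features"
  else if PySem.Str.isIn "technical" t then some "addressing technical challenges"
  else if PySem.Str.isIn "unique" t then some "offering unique value"
  else none

-- the per-step phrase as a function of the step
def pvF (s : List (String × String)) : Option String :=
  pvChainOpt (PySem.Str.lower (PySem.Dict.getD (PySem.Dict.ofList s) "thought" ""))

-- per step: B's min-index classification equals A's first-match chain
set_option maxHeartbeats 1600000 in
theorem pvPhraseOf_eq (th : String) :
    pvPhraseOf th = pvChainOpt (PySem.Str.lower th) := by
  by_cases h1 : PySem.Chars.isIn "problem".toList (PySem.Chars.lower th.toList) = true <;>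
  by_cases h2 : PySem.Chars.isIn "audience".toList (PySem.Chars.lower th.toList) = true <;>
  by_cases h3 : PySem.Chars.isIn "features".toList (PySem.Chars.lower th.toList) = true <;>
  by_cases h4 : PySem.Chars.isIn "technical".toList (PySem.Chars.lower th.toList) = true <;>
  by_cases h5 : PySem.Chars.isIn "unique".toList (PySem.Chars.lower th.toList) = true <;>
    norm_num [pvPhraseOf, pvChainOpt, pvKeywords, pvPhrases, h1, h2, h3, h4, h5,
      PySem.List.enumerate_cons, PySem.List.enumerate_nil, PySem.List.min?,
      PySem.List.pyGet?, PySem.List.pyIdx?, List.filter_cons] <;> decide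

-- A's per-step append is the optional phrase appended
theorem pvStep_eq (step : List (String × String)) (acc : List String) :
    pvStepEnh step acc = acc ++ (pvF step).toList := by
  unfold pvStepEnh pvF pvChainOpt
  split_ifs <;> simp_all

-- A's fold collects exactly the per-step optional phrases
theorem pvFold_eq (steps : List (List (String × String))) (acc : List String) :
    steps.foldl (fun a step => pvStepEnh step a) acc
      = acc ++ (steps.map pvF).filterMap id := by
  induction steps generalizing acc with
  | nil => simp
  | cons s rest ih =>
      rw [List.foldl_cons, pvStep_eq, ih]
      cases h : pvF s <;>
        simp only [List.map_cons, List.filterMap_cons, h, Option.toList, id,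
          List.append_assoc, List.append_nil, List.singleton_append]

theorem pvJoin_singleton (ph : String) : PySem.Str.join ", " [ph] = ph := by
  apply String.toList_inj.mp
  simp [PySem.Str.toList_join, PySem.Chars.join_singleton]

theorem pvJoin_cons (a b : String) (t : List String) :
    PySem.Str.join ", " (a :: b :: t) = a ++ ", " ++ PySem.Str.join ", " (b :: t) := by
  apply String.toList_inj.mp
  simp [PySem.Str.toList_join, PySem.Chars.join_cons_cons]

-- B's back-to-front recursion equals joining the collected phrases
theorem pvSuffix_eq (steps : List (List (String × String))) :
    pvSuffix steps
      = match (steps.map pvF).filterMap id with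
        | [] => none
        | l => some (PySem.Str.join ", " l) := by
  induction steps with
  | nil => simp [pvSuffix]
  | cons s rest ih =>
      unfold pvSuffix
      rw [ih, pvPhraseOf_eq, show pvChainOpt (PySem.Str.lower (PySem.Dict.getD (PySem.Dict.ofList s) "thought" "")) = pvF s from rfl]
      cases hp : pvF s with
      | none => simp only [List.map_cons, List.filterMap_cons, id_eq, hp]
      | some ph =>
          cases hl : (rest.map pvF).filterMap id with
          | nil =>
              simp only [List.map_cons, List.filterMap_cons, id_eq, hp,
                show (fun x : Option String => x) = id from rfl, hl, pvJoin_singleton]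
          | cons b t =>
              simp only [List.map_cons, List.filterMap_cons, id_eq, hp,
                show (fun x : Option String => x) = id from rfl, hl, pvJoin_cons]

-- ===== VERDICT (by name: the statement is the Claim_ definition above) =====
theorem enhance_idea_from_thinking_py_spec : Claim_equal_enhance_idea_from_thinking_py := by
  intro _idea steps _ _
  unfold Spec_enhance_idea_from_thinking_py enhance_idea_from_thinking_py
    enhance_idea_from_thinking_py_alt
  rw [pvSuffix_eq, pvFold_eq]
  cases hl : (steps.map pvF).filterMap id <;>
    simp only [hl] <;> simp
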